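-- pv_equiv track=rewrite | github.com/Birhant/Document-summarizer | Processes/supporters/doc_format.py | prepare_format_0
-- ===== SOURCE A (Python) =====
-- def prepare_format_0(doc_text):
--     prepared_text = []
--     text_under_heading = ''
--     current_style=''
--     for page_text in doc_text:
--         for block_text in page_text:
--             text = block_text[0]
--             style = block_text[1]
--             if style.startswith('heading'):
--                 content = (current_style,text_under_heading)
--                 prepared_text.append(content)
--                 text_under_heading = ''
--                 current_style = text, style
--             else:
--                 text_under_heading +=text
--     prepared_text = prepared_text[1:]
--     return prepared_text
-- ===== SOURCE B (Python) =====
-- def prepare_format_0(doc_text):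
--     flat = [block for page in doc_text for block in page]
--     heads = [i for i, block in enumerate(flat) if block[1].startswith('heading')]
--     return [((flat[p][0], flat[p][1]),
--              ''.join(flat[j][0] for j in range(p + 1, q)))
--             for p, q in zip(heads, heads[1:])]
-- ===== Notes on version B (the rewrite author's own statement) =====
-- stated objective: alternative
-- what changed: Replaces A's stateful single pass (accumulator string, current-heading register, append-then-drop-first trick) by an index-based decomposition: flatten the pages, list the positions of heading blocks, and emit one (heading, joined text) pair per consecutive pair of heading positions.
import Mathlib
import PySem

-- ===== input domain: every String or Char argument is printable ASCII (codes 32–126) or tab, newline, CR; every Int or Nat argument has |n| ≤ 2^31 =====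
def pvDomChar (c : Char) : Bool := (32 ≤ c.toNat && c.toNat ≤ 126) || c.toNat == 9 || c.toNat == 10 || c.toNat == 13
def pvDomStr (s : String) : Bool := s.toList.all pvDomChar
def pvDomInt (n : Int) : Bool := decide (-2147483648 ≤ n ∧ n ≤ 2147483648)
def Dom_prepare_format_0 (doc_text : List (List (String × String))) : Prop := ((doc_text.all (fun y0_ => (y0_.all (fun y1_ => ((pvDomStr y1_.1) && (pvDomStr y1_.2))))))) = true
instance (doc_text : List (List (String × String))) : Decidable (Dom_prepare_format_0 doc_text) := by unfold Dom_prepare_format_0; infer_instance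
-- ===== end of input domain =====

-- B replaces A's stateful single pass (running text accumulator, current-heading register,
-- append-then-drop-first trick) by an index-based decomposition over heading positions; same cost.

-- ===== PORT A =====
-- loop body of A's inner 'for block_text in page_text', as a named helper;
-- state = (prepared_text, text_under_heading, current_style).  Python's current_style starts as
-- the string '' and is only ever put into the FIRST appended pair, which 'prepared_text[1:]'
-- drops, so the typed sentinel ("", "") stands in for it.
def pvStepA (st : List ((String × String) × String) × String × (String × String))
    (block_text : String × String) :
    List ((String × String) × String) × String × (String × String) :=
  let text := block_text.1
  let style := block_text.2
  if PySem.Str.startswith style "heading" then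
    (st.1 ++ [(st.2.2, st.2.1)], "", (text, style))
  else
    (st.1, st.2.1 ++ text, st.2.2)

def prepare_format_0 (doc_text : List (List (String × String))) : List ((String × String) × String) :=
  let fin := doc_text.foldl (fun st page_text => page_text.foldl pvStepA st) ([], "", ("", ""))
  PySem.List.slice fin.1 (some 1) none

-- ===== PORT B =====
-- from Source B: flatten, list heading positions, one output pair per consecutive pair of positions.
-- flat[p] / flat[j] are in range by construction; '.getD ("", "")' only totalises the lookup.
def prepare_format_0_alt (doc_text : List (List (String × String))) : List ((String × String) × String) :=
  let flat := doc_text.flatMap (fun page => page)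
  let heads : List Int := (PySem.List.enumerate flat).filterMap
    (fun p => if PySem.Str.startswith p.2.2 "heading" then some p.1 else none)
  (heads.zip (PySem.List.slice heads (some 1) none)).map (fun pq =>
    ((((PySem.List.pyGet? flat pq.1).getD ("", "")).1,
      ((PySem.List.pyGet? flat pq.1).getD ("", "")).2),
     PySem.Str.join "" ((PySem.List.pyRange (pq.1 + 1) pq.2 1).map
       (fun j => ((PySem.List.pyGet? flat j).getD ("", "")).1))))

-- ===== PRECONDITION & SPEC =====
def Spec_prepare_format_0 (doc_text : List (List (String × String))) (out : List ((String × String) × String)) : Prop := out = prepare_format_0_alt doc_text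
instance (doc_text : List (List (String × String))) (out : List ((String × String) × String)) : Decidable (Spec_prepare_format_0 doc_text out) := by unfold Spec_prepare_format_0; infer_instance

-- ===== CLAIM (what is proved, stated in full; the proofs are below) =====
def Claim_equal_prepare_format_0 : Prop := ∀ (doc_text : List (List (String × String))), Dom_prepare_format_0 doc_text → Spec_prepare_format_0 doc_text (prepare_format_0 doc_text)

-- ===== LEMMAS AND PROOFS =====

-- is this block a heading?
def pvHd (b : String × String) : Bool := PySem.Str.startswith b.2 "heading"

-- A's loop over the flat block list, from an arbitrary (text, style) register state
def pvSeg (cur : String × String) (tuh : String) :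
    List (String × String) → List ((String × String) × String)
  | [] => []
  | b :: rest => if pvHd b then (cur, tuh) :: pvSeg b "" rest else pvSeg cur (tuh ++ b.1) rest

-- positions of the heading blocks
def pvHds : List (String × String) → List Int
  | [] => []
  | b :: rest => (if pvHd b then [(0 : Int)] else []) ++ (pvHds rest).map (· + 1)

-- B's per-pair segment builder (the map body of port B)
def pvSg (flat : List (String × String)) (pq : Int × Int) : (String × String) × String :=
  ((((PySem.List.pyGet? flat pq.1).getD ("", "")).1,
    ((PySem.List.pyGet? flat pq.1).getD ("", "")).2),
   PySem.Str.join "" ((PySem.List.pyRange (pq.1 + 1) pq.2 1).map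
     (fun j => ((PySem.List.pyGet? flat j).getD ("", "")).1)))

-- B's output on the flat block list
def pvBody (flat : List (String × String)) : List ((String × String) × String) :=
  ((pvHds flat).zip (pvHds flat).tail).map (pvSg flat)

-- joined texts of blocks a ≤ j < b
def pvJoinT (flat : List (String × String)) (a b : Int) : String :=
  PySem.Str.join "" ((PySem.List.pyRange a b 1).map
    (fun j => ((PySem.List.pyGet? flat j).getD ("", "")).1))

lemma pvJoin_cons (x : String) (xs : List String) :
    PySem.Str.join "" (x :: xs) = x ++ PySem.Str.join "" xs := by
  cases xs <;> simp [PySem.Str.join, PySem.Chars.join_cons_cons]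

lemma pvGet_zero (b : String × String) (rest : List (String × String)) :
    PySem.List.pyGet? (b :: rest) 0 = some b := by
  simp [PySem.List.pyGet?, PySem.List.pyIdx?]

lemma pvHds_nonneg : ∀ (l : List (String × String)), ∀ x ∈ pvHds l, 0 ≤ x := by
  intro l
  induction l with
  | nil => simp [pvHds]
  | cons b rest ih =>
    intro x hx
    simp only [pvHds, List.mem_append, List.mem_map] at hx
    rcases hx with hx | ⟨y, hy, rfl⟩
    · split at hx <;> simp_all
    · have := ih y hy; omega

lemma pvHeads_eq : ∀ (l : List (String × String)) (s : Int),
    (PySem.List.enumerate l s).filterMap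
      (fun p => if pvHd p.2 then some p.1 else none)
      = (pvHds l).map (· + s) := by
  intro l
  induction l with
  | nil => intro s; simp [pvHds, PySem.List.enumerate]
  | cons b rest ih =>
    intro s
    rw [PySem.List.enumerate_cons, List.filterMap_cons, ih (s + 1)]
    have hcons : (if pvHd (s, b).2 then some (s, b).1 else none : Option Int)
        = if pvHd b then some s else none := rfl
    rw [hcons]
    by_cases hb : pvHd b
    · rw [if_pos hb]
      simp only [pvHds, if_pos hb, List.map_map, List.map_cons,
        List.singleton_append, Int.zero_add]
      congr 1
      apply List.map_congr_left; intro x _; simp; omega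
    · rw [if_neg hb]
      simp only [pvHds, if_neg hb, List.map_map, List.nil_append]
      apply List.map_congr_left; intro x _; simp; omega

lemma pvGet_shift (b : String × String) (rest : List (String × String)) (j : Int) (hj : 0 ≤ j) :
    PySem.List.pyGet? (b :: rest) (j + 1) = PySem.List.pyGet? rest j := by
  obtain ⟨n, rfl⟩ := Int.eq_ofNat_of_zero_le hj
  have h1 : (n : Int) + 1 = ((n + 1 : Nat) : Int) := by push_cast; ring
  rw [h1, PySem.List.pyGet?_natCast, PySem.List.pyGet?_natCast]
  simp

lemma pvRange_shift (a b : Int) :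
    PySem.List.pyRange (a + 1) (b + 1) 1 = (PySem.List.pyRange a b 1).map (· + 1) := by
  rw [PySem.List.pyRange_one, PySem.List.pyRange_one, List.map_map]
  have h : (b + 1 - (a + 1)).toNat = (b - a).toNat := by omega
  rw [h]
  apply List.map_congr_left; intro x _; simp; omega

lemma pvJoinT_shift (b : String × String) (rest : List (String × String)) (q : Int) :
    pvJoinT (b :: rest) 1 (q + 1) = pvJoinT rest 0 q := by
  unfold pvJoinT
  rw [show PySem.List.pyRange 1 (q + 1) 1 = (PySem.List.pyRange 0 q 1).map (· + 1) from by
        simpa using pvRange_shift 0 q]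
  rw [List.map_map]
  congr 1
  apply List.map_congr_left
  intro j hj
  have hj0 : 0 ≤ j := (PySem.List.mem_pyRange_one.mp hj).1
  simp [pvGet_shift b rest j hj0]

lemma pvSg_shift (b : String × String) (rest : List (String × String)) (p q : Int)
    (hp : 0 ≤ p) :
    pvSg (b :: rest) (p + 1, q + 1) = pvSg rest (p, q) := by
  unfold pvSg
  simp only
  rw [pvGet_shift b rest p hp]
  congr 1
  rw [pvRange_shift (p + 1) q, List.map_map]
  congr 1
  apply List.map_congr_left
  intro j hj
  have hj0 : 0 ≤ j := by
    have := (PySem.List.mem_pyRange_one.mp hj).1; omega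
  simp [pvGet_shift b rest j hj0]

lemma pvZip_shift (b : String × String) (rest : List (String × String)) (ns : List Int)
    (h : ∀ x ∈ ns, 0 ≤ x) :
    ((ns.map (· + 1)).zip (ns.map (· + 1)).tail).map (pvSg (b :: rest))
      = (ns.zip ns.tail).map (pvSg rest) := by
  rw [← List.map_tail, List.zip_map, List.map_map]
  apply List.map_congr_left
  intro x hx
  obtain ⟨h1, h2⟩ := List.of_mem_zip hx
  have hp : 0 ≤ x.1 := h x.1 h1
  simp [Prod.map, pvSg_shift b rest x.1 x.2 hp]

lemma pvMain : ∀ (l : List (String × String)) (h : String × String) (t : String),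
    pvSeg h t l = (match pvHds l with
      | [] => []
      | q :: _ => (h, t ++ pvJoinT l 0 q) :: pvBody l) := by
  intro l
  induction l with
  | nil => intro h t; simp [pvSeg, pvHds]
  | cons b rest ih =>
    intro h t
    by_cases hb : pvHd b
    · have hhds : pvHds (b :: rest) = 0 :: (pvHds rest).map (· + 1) := by simp [pvHds, hb]
      have hseg : pvSeg h t (b :: rest) = (h, t) :: pvSeg b "" rest := by simp [pvSeg, hb]
      have hJ0 : pvJoinT (b :: rest) 0 0 = "" := by
        simp [pvJoinT, PySem.List.pyRange_one_eq_nil (le_refl (0 : Int)), PySem.Str.join]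
      have hbody : pvSeg b "" rest = pvBody (b :: rest) := by
        unfold pvBody
        rw [hhds]
        cases hr : pvHds rest with
        | nil =>
          have ihc : pvSeg b "" rest = [] := by
            have h0 := ih b ""; rw [hr] at h0; exact h0
          simp [ihc]
        | cons q qs =>
          have ihc : pvSeg b "" rest = (b, "" ++ pvJoinT rest 0 q) :: pvBody rest := by
            have h0 := ih b ""; rw [hr] at h0; exact h0
          have htail := pvZip_shift b rest (pvHds rest) (pvHds_nonneg rest)
          rw [hr] at htail
          have hhead : pvSg (b :: rest) (0, q + 1) = ((b.1, b.2), pvJoinT rest 0 q) := by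
            unfold pvSg
            rw [pvGet_zero]
            simp only [Option.getD_some]
            congr 1
            rw [show PySem.List.pyRange (0 + 1) (q + 1) 1 = PySem.List.pyRange 1 (q + 1) 1
                  from by norm_num]
            exact pvJoinT_shift b rest q
          rw [ihc]
          simp only [List.map_cons, List.tail_cons, List.zip_cons_cons, List.map_cons]
          simp only [List.map_cons, List.tail_cons] at htail
          rw [htail, hhead]
          have hb2 : pvBody rest = ((q :: qs).zip (q :: qs).tail).map (pvSg rest) := by
            unfold pvBody; rw [hr]
          rw [hb2]
          simp
      rw [hseg, hbody, hhds]
      show (h, t) :: pvBody (b :: rest)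
          = (h, t ++ pvJoinT (b :: rest) 0 0) :: pvBody (b :: rest)
      rw [hJ0]
      simp
    · have hhds : pvHds (b :: rest) = (pvHds rest).map (· + 1) := by simp [pvHds, hb]
      have hseg : pvSeg h t (b :: rest) = pvSeg h (t ++ b.1) rest := by simp [pvSeg, hb]
      rw [hseg]
      cases hr : pvHds rest with
      | nil =>
        have ihc : pvSeg h (t ++ b.1) rest = [] := by
          have h0 := ih h (t ++ b.1); rw [hr] at h0; exact h0
        have h2 : pvHds (b :: rest) = [] := by rw [hhds, hr]; rfl
        rw [ihc, h2]
      | cons q qs =>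
        have hq : 0 ≤ q := pvHds_nonneg rest q (by rw [hr]; exact List.mem_cons_self)
        have ihc : pvSeg h (t ++ b.1) rest
            = (h, (t ++ b.1) ++ pvJoinT rest 0 q) :: pvBody rest := by
          have h0 := ih h (t ++ b.1); rw [hr] at h0; exact h0
        have h2 : pvHds (b :: rest) = (q + 1) :: qs.map (· + 1) := by
          rw [hhds, hr]; simp
        have hbody2 : pvBody (b :: rest) = pvBody rest := by
          unfold pvBody
          rw [hhds]
          exact pvZip_shift b rest (pvHds rest) (pvHds_nonneg rest)
        have hJ : pvJoinT (b :: rest) 0 (q + 1) = b.1 ++ pvJoinT rest 0 q := by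
          unfold pvJoinT
          rw [PySem.List.pyRange_one_cons (show (0 : Int) < q + 1 by omega), List.map_cons,
            pvGet_zero]
          simp only [Option.getD_some]
          rw [pvJoin_cons]
          congr 1
          rw [show (0 : Int) + 1 = 1 from by norm_num]
          exact pvJoinT_shift b rest q
        rw [ihc, h2]
        show (h, (t ++ b.1) ++ pvJoinT rest 0 q) :: pvBody rest
            = (h, t ++ pvJoinT (b :: rest) 0 (q + 1)) :: pvBody (b :: rest)
        rw [hJ, hbody2, String.append_assoc]

lemma pvDrop : ∀ (l : List (String × String)) (c : String × String) (t : String),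
    (pvSeg c t l).drop 1 = pvBody l := by
  intro l
  induction l with
  | nil => intro c t; simp [pvSeg, pvBody, pvHds]
  | cons b rest ih =>
    intro c t
    by_cases hb : pvHd b
    · have hhds : pvHds (b :: rest) = 0 :: (pvHds rest).map (· + 1) := by simp [pvHds, hb]
      have hseg : pvSeg c t (b :: rest) = (c, t) :: pvSeg b "" rest := by simp [pvSeg, hb]
      have h1 := pvMain (b :: rest) c t
      rw [hseg, hhds] at h1
      have h2 : pvSeg b "" rest = pvBody (b :: rest) := by
        have h3 := congrArg List.tail h1
        simpa using h3
      rw [hseg, List.drop_one, List.tail_cons, h2]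
    · have hseg : pvSeg c t (b :: rest) = pvSeg c (t ++ b.1) rest := by simp [pvSeg, hb]
      have hhds : pvHds (b :: rest) = (pvHds rest).map (· + 1) := by simp [pvHds, hb]
      rw [hseg, ih c (t ++ b.1)]
      unfold pvBody
      rw [hhds, pvZip_shift b rest (pvHds rest) (pvHds_nonneg rest)]

lemma pvStepA_eq (st : List ((String × String) × String) × String × (String × String))
    (b : String × String) :
    pvStepA st b = if pvHd b then (st.1 ++ [(st.2.2, st.2.1)], "", (b.1, b.2))
      else (st.1, st.2.1 ++ b.1, st.2.2) := rfl

lemma pvFoldA : ∀ (l : List (String × String)) (p : List ((String × String) × String))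
    (t : String) (c : String × String),
    (l.foldl pvStepA (p, t, c)).1 = p ++ pvSeg c t l := by
  intro l
  induction l with
  | nil => intro p t c; simp [pvSeg]
  | cons b rest ih =>
    intro p t c
    rw [List.foldl_cons, pvStepA_eq]
    by_cases hb : pvHd b
    · rw [if_pos hb]
      rw [ih]
      simp [pvSeg, hb]
    · rw [if_neg hb]
      rw [ih]
      simp [pvSeg, hb]

lemma pvA_eq (doc_text : List (List (String × String))) :
    prepare_format_0 doc_text = (pvSeg ("", "") "" doc_text.flatten).drop 1 := by
  unfold prepare_format_0
  simp only
  rw [PySem.List.slice_from _ (by omega : (0 : Int) ≤ 1)]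
  have h : (doc_text.foldl (fun st page_text => page_text.foldl pvStepA st)
      (([], "", ("", "")) : List ((String × String) × String) × String × (String × String)))
      = doc_text.flatten.foldl pvStepA ([], "", ("", "")) := by
    rw [List.foldl_flatten]
  rw [h, pvFoldA]
  simp

lemma pvB_eq (doc_text : List (List (String × String))) :
    prepare_format_0_alt doc_text = pvBody doc_text.flatten := by
  unfold prepare_format_0_alt
  simp only
  have hflat : doc_text.flatMap (fun page => page) = doc_text.flatten := by
    simp [List.flatMap_def]
  rw [hflat]
  have hheads : (PySem.List.enumerate doc_text.flatten).filterMap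
      (fun p => if PySem.Str.startswith p.2.2 "heading" then some p.1 else none)
      = pvHds doc_text.flatten := by
    have h := pvHeads_eq doc_text.flatten 0
    have h2 : (pvHds doc_text.flatten).map (· + 0) = pvHds doc_text.flatten := by simp
    rw [h2] at h
    exact h
  rw [hheads]
  rw [PySem.List.slice_from _ (by omega : (0 : Int) ≤ 1)]
  simp only [Int.toNat_one, List.drop_one]
  rfl

-- ===== VERDICT (by name: the statement is the Claim_ definition above) =====
theorem prepare_format_0_spec : Claim_equal_prepare_format_0 := by
  intro doc_text _
  unfold Spec_prepare_format_0
  rw [pvA_eq, pvB_eq, pvDrop]
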